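-- pv_equiv track=rewrite | github.com/DiamonDinoia/simdref | src/simdref/display.py | normalize_instruction_query
-- ===== SOURCE A (Python) =====
-- def normalize_instruction_query(value: str) -> str:
--     """Normalize an instruction query to lowercase alphanumeric tokens."""
--     text = value.replace("_", " ").replace(",", " ").replace("{", " ").replace("}", " ")
--     tokens = []
--     for ch in text:
--         if ch.isalnum():
--             tokens.append(ch.lower())
--         elif tokens and tokens[-1] != " ":
--             tokens.append(" ")
--     return "".join(tokens).strip()
-- ===== SOURCE B (Python) =====
-- def normalize_instruction_query(value: str) -> str:
--     """Normalize an instruction query to lowercase alphanumeric tokens."""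
--     mapped = "".join(ch.lower() if ch.isalnum() else " " for ch in value)
--     return " ".join(mapped.split())
-- ===== Notes on version B (the rewrite author's own statement) =====
-- stated objective: idiomatic
-- what changed: B drops the redundant replace() calls and A's char-by-char token accumulator with a trailing-space flag and final strip; instead it maps every non-alphanumeric character to a space and uses str.split() with a space join to extract and rejoin the lowercased words.
import Mathlib
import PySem

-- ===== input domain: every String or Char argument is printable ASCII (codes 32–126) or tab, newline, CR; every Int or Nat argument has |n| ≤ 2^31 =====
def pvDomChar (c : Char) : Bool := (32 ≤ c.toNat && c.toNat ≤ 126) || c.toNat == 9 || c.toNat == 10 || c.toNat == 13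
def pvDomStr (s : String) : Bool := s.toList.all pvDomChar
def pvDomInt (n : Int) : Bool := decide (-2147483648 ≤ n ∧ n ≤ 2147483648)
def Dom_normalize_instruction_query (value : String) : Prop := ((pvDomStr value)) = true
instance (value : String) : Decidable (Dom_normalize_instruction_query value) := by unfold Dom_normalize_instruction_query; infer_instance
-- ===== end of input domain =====

-- B normalizes by mapping every non-alphanumeric char to a space and using split()/join,
-- instead of A's char-by-char scan with a last-was-space flag, final strip and redundant replace() calls (objective: idiomatic).

-- ===== PORT A =====
def normalize_instruction_query (value : String) : String :=
  let text := PySem.Str.replace (PySem.Str.replace (PySem.Str.replace (PySem.Str.replace value "_" " ") "," " ") "{" " ") "}" " "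
  let tokens := text.toList.foldl (fun toks ch =>
    if PySem.Chars.isalnum ch then toks ++ [PySem.Chars.lowerChar ch]
    else if toks ≠ [] ∧ toks.getLast? ≠ some ' ' then toks ++ [' '] else toks) ([] : List Char)
  String.ofList (PySem.Chars.strip tokens)

-- ===== PORT B =====
def normalize_instruction_query_alt (value : String) : String :=
  let mapped := value.toList.map (fun ch => if PySem.Chars.isalnum ch then PySem.Chars.lowerChar ch else ' ')
  String.ofList (PySem.Chars.join [' '] (PySem.Chars.split₀ mapped))

-- ===== PRECONDITION & SPEC =====
def Spec_normalize_instruction_query (value : String) (out : String) : Prop := out = normalize_instruction_query_alt value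
instance (value : String) (out : String) : Decidable (Spec_normalize_instruction_query value out) := by unfold Spec_normalize_instruction_query; infer_instance

-- ===== CLAIM (what is proved, stated in full; the proofs are below) =====
def Claim_equal_normalize_instruction_query : Prop := ∀ (value : String), Dom_normalize_instruction_query value → Spec_normalize_instruction_query value (normalize_instruction_query value)

-- ===== LEMMAS AND PROOFS =====

-- char-class facts
theorem pvCharLe (a b : Char) : (a ≤ b) ↔ (a.toNat ≤ b.toNat) := by
  rw [Char.le_def, UInt32.le_iff_toNat_le]; rfl

theorem pvIsspace_false (d : Char) (h1 : 48 ≤ d.toNat) (h2 : d.toNat ≤ 122) : PySem.Chars.isspace d = false := by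
  simp only [PySem.Chars.isspace]
  simp only [Bool.or_eq_false_iff, Bool.and_eq_false_iff, decide_eq_false_iff_not]
  omega

theorem pvLower_nonspace (c : Char) (h : PySem.Chars.isalnum c = true) :
    PySem.Chars.isspace (PySem.Chars.lowerChar c) = false := by
  simp only [PySem.Chars.isalnum, PySem.Chars.isalpha, PySem.Chars.isdigit, PySem.Chars.isupper,
    PySem.Chars.islower, Bool.or_eq_true, Bool.and_eq_true, decide_eq_true_eq, pvCharLe,
    show ('A').toNat = 65 from rfl, show ('Z').toNat = 90 from rfl, show ('a').toNat = 97 from rfl,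
    show ('z').toNat = 122 from rfl, show ('0').toNat = 48 from rfl, show ('9').toNat = 57 from rfl] at h
  unfold PySem.Chars.lowerChar
  by_cases hu : PySem.Chars.isupper c = true
  · simp only [hu, if_true]
    have hb : 65 ≤ c.toNat ∧ c.toNat ≤ 90 := by
      simpa [PySem.Chars.isupper, Bool.and_eq_true, decide_eq_true_eq, pvCharLe,
        show ('A').toNat = 65 from rfl, show ('Z').toNat = 90 from rfl] using hu
    have ht : (Char.ofNat (c.toNat + 32)).toNat = c.toNat + 32 := by
      rw [Char.toNat_ofNat, if_pos]; exact Or.inl (by omega)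
    exact pvIsspace_false _ (by omega) (by omega)
  · rw [if_neg hu]
    have hb : ¬ (65 ≤ c.toNat ∧ c.toNat ≤ 90) := by
      intro hc
      exact hu (by simp only [PySem.Chars.isupper, Bool.and_eq_true, decide_eq_true_eq, pvCharLe,
        show ('A').toNat = 65 from rfl, show ('Z').toNat = 90 from rfl]; omega)
    exact pvIsspace_false _ (by omega) (by omega)

-- the classifier B maps with, and A's loop step
def pvF (c : Char) : Char := if PySem.Chars.isalnum c then PySem.Chars.lowerChar c else ' '
def pvStep (toks : List Char) (c : Char) : List Char :=
  if PySem.Chars.isalnum c then toks ++ [PySem.Chars.lowerChar c]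
  else if toks ≠ [] ∧ toks.getLast? ≠ some ' ' then toks ++ [' '] else toks
-- A's token list, expressed from split₀.go's state: completed words (reversed order) each followed by a space, then the current run
def pvI (acc : List (List Char)) (cur : List Char) : List Char :=
  ((acc.reverse).map (· ++ [' '])).flatten ++ cur.reverse

-- replace with single-char pattern is a map
theorem pvReplace_go_single (a b : Char) : ∀ (l : List Char) (fuel : Nat) (acc : List Char), l.length ≤ fuel →
    PySem.Chars.replace.go [a] [b] fuel l acc = acc.reverse ++ l.map (fun c => if c = a then b else c) := by
  intro l
  induction l with
  | nil => intro fuel acc _; cases fuel <;> simp [PySem.Chars.replace.go]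
  | cons c t ih =>
    intro fuel acc hf
    cases fuel with
    | zero => simp at hf
    | succ f =>
      simp only [PySem.Chars.replace.go]
      by_cases hc : a = c
      · subst hc
        have hpre : [a].isPrefixOf (a :: t) = true := by simp [List.isPrefixOf]
        rw [if_pos hpre, show List.drop ([a].length) (a :: t) = t from rfl]
        rw [ih f _ (by simpa using hf)]
        simp
      · have hpre : [a].isPrefixOf (c :: t) = false := by simp [List.isPrefixOf, hc]
        rw [if_neg (by simp [hpre])]
        rw [ih f _ (by simpa using hf)]
        simp
        exact fun h => absurd h.symm hc

theorem pvReplace_single (a b : Char) (l : List Char) :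
    PySem.Chars.replace l [a] [b] = l.map (fun c => if c = a then b else c) := by
  unfold PySem.Chars.replace
  rw [if_neg (by simp)]
  simpa using pvReplace_go_single a b l l.length [] le_rfl

-- A's step ignores the four replacements (they turn non-alnum chars into the non-alnum ' ')
def pvRepl4 (c : Char) : Char :=
  (fun c => if c = '}' then ' ' else c) ((fun c => if c = '{' then ' ' else c)
    ((fun c => if c = ',' then ' ' else c) ((fun c => if c = '_' then ' ' else c) c)))

theorem pvStep_repl4 (toks : List Char) (c : Char) : pvStep toks (pvRepl4 c) = pvStep toks c := by
  by_cases h1 : c = '_'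
  · subst h1; rfl
  · by_cases h2 : c = ','
    · subst h2; rfl
    · by_cases h3 : c = '{'
      · subst h3; rfl
      · by_cases h4 : c = '}'
        · subst h4; rfl
        · simp [pvRepl4, h1, h2, h3, h4]

-- strip/join facts
theorem pvLstrip_cons (a : Char) (t : List Char) (ha : PySem.Chars.isspace a = false) :
    PySem.Chars.lstrip (a :: t) = a :: t := by
  simp [PySem.Chars.lstrip, ha]

theorem pvRstrip_id (s : List Char) (a : Char) (h : s.getLast? = some a) (ha : PySem.Chars.isspace a = false) :
    PySem.Chars.rstrip s = s := by
  have hr : s.reverse.head? = some a := by rw [List.head?_reverse]; exact h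
  obtain ⟨t, ht⟩ : ∃ t, s.reverse = a :: t := by
    cases hrev : s.reverse with
    | nil => rw [hrev] at hr; simp at hr
    | cons x xs => rw [hrev] at hr; simp at hr; exact ⟨xs, by rw [hr]⟩
  have : PySem.Chars.rstrip s = (a :: t).reverse := by
    simp only [PySem.Chars.rstrip, ht, List.dropWhile_cons, ha]; simp
  rw [this, ← ht, List.reverse_reverse]

theorem pvRstrip_append_space (s : List Char) :
    PySem.Chars.rstrip (s ++ [' ']) = PySem.Chars.rstrip s := by
  simp [PySem.Chars.rstrip, show PySem.Chars.isspace ' ' = true from rfl]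

theorem pvJoin_append_single (ws : List (List Char)) (r : List Char) (h : ws ≠ []) :
    PySem.Chars.join [' '] (ws ++ [r]) = PySem.Chars.join [' '] ws ++ [' '] ++ r := by
  induction ws with
  | nil => simp at h
  | cons w rest ih =>
    cases rest with
    | nil => simp [PySem.Chars.join_cons_cons, PySem.Chars.join_singleton]
    | cons w' rest' =>
      simp only [List.cons_append]
      rw [PySem.Chars.join_cons_cons, PySem.Chars.join_cons_cons]
      simp only [← List.cons_append]
      rw [ih (by simp)]
      simp

theorem pvFlatten_words (ws : List (List Char)) (h : ws ≠ []) :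
    (ws.map (· ++ [' '])).flatten = PySem.Chars.join [' '] ws ++ [' '] := by
  induction ws with
  | nil => simp at h
  | cons w rest ih =>
    cases rest with
    | nil => simp [PySem.Chars.join_singleton]
    | cons w' rest' =>
      rw [List.map_cons, List.flatten_cons, ih (by simp), PySem.Chars.join_cons_cons]
      simp

theorem pvJoin_head (ws : List (List Char)) (w : List Char) (rest : List (List Char)) (a : Char) (t : List Char)
    (hws : ws = (a :: t) :: rest) :
    ∃ u, PySem.Chars.join [' '] ws = a :: u := by
  subst hws
  cases rest with
  | nil => exact ⟨t, by simp [PySem.Chars.join_singleton]⟩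
  | cons w' rest' =>
    rw [PySem.Chars.join_cons_cons]
    exact ⟨t ++ [' '] ++ PySem.Chars.join [' '] (w' :: rest'), by simp⟩

theorem pvJoin_last (ws : List (List Char)) (r : List Char) (hr : r ≠ []) :
    (PySem.Chars.join [' '] (ws ++ [r])).getLast? = r.getLast? := by
  induction ws with
  | nil => simp [PySem.Chars.join_singleton]
  | cons w rest ih =>
    have hne : rest ++ [r] ≠ [] := by simp
    obtain ⟨q, qs, hq⟩ : ∃ q qs, rest ++ [r] = q :: qs := by
      cases hrr : rest ++ [r] with
      | nil => exact absurd hrr hne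
      | cons q qs => exact ⟨q, qs, rfl⟩
    rw [List.cons_append, hq, PySem.Chars.join_cons_cons, ← hq]
    have hjne : PySem.Chars.join [' '] (rest ++ [r]) ≠ [] := by
      intro hnil
      rw [hnil] at ih; simp at ih
      exact hr (List.getLast?_eq_none_iff.mp ih.symm)
    rw [List.getLast?_append_of_ne_nil _ hjne, ih]

-- invariant on split₀.go's state
def pvInv (acc : List (List Char)) (cur : List Char) : Prop :=
  (∀ x ∈ cur, PySem.Chars.isspace x = false) ∧
  (∀ w ∈ acc, w ≠ [] ∧ ∀ x ∈ w, PySem.Chars.isspace x = false)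

-- strip is the identity on a list with non-space first and last char
theorem pvStrip_id (s : List Char) (a b : Char) (hh : s.head? = some a) (ha : PySem.Chars.isspace a = false)
    (hl : s.getLast? = some b) (hb : PySem.Chars.isspace b = false) : PySem.Chars.strip s = s := by
  obtain ⟨t, ht⟩ : ∃ t, s = a :: t := by
    cases s with
    | nil => simp at hh
    | cons x xs => simp at hh; exact ⟨xs, by rw [hh]⟩
  unfold PySem.Chars.strip
  rw [ht, pvLstrip_cons a t ha, ← ht, pvRstrip_id s b hl hb]

theorem pvWord_last (w : List Char) (hw : w ≠ []) (hns : ∀ x ∈ w, PySem.Chars.isspace x = false) :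
    ∃ b, w.getLast? = some b ∧ PySem.Chars.isspace b = false := by
  refine ⟨w.getLast hw, ?_, hns _ (List.getLast_mem hw)⟩
  exact List.getLast?_eq_some_getLast hw

-- head of the join of collected words is the (non-space) head of the first word
theorem pvJoin_ws_head (ws : List (List Char)) (hne : ws ≠ [])
    (hws : ∀ w ∈ ws, w ≠ [] ∧ ∀ x ∈ w, PySem.Chars.isspace x = false) :
    ∃ a u, PySem.Chars.join [' '] ws = a :: u ∧ PySem.Chars.isspace a = false := by
  obtain ⟨w, rest, hw⟩ : ∃ w rest, ws = w :: rest := by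
    cases ws with
    | nil => exact absurd rfl hne
    | cons w rest => exact ⟨w, rest, rfl⟩
  obtain ⟨hwne, hwns⟩ := hws w (by rw [hw]; exact List.mem_cons_self)
  obtain ⟨a, t, hat⟩ : ∃ a t, w = a :: t := by
    cases w with
    | nil => exact absurd rfl hwne
    | cons a t => exact ⟨a, t, rfl⟩
  obtain ⟨u, hu⟩ := pvJoin_head ws w rest a t (by rw [hw, hat])
  exact ⟨a, u, hu, hwns a (by rw [hat]; exact List.mem_cons_self)⟩

-- base case: stripping A's token list = joining the words collected so far
theorem pvBase (acc : List (List Char)) (cur : List Char) (hinv : pvInv acc cur) :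
    PySem.Chars.strip (pvI acc cur) = PySem.Chars.join [' '] (PySem.Chars.split₀.go [] cur acc) := by
  obtain ⟨hcur, hacc⟩ := hinv
  have haccrev : ∀ w ∈ acc.reverse, w ≠ [] ∧ ∀ x ∈ w, PySem.Chars.isspace x = false := by
    intro w hw; exact hacc w (List.mem_reverse.mp hw)
  cases cur with
  | nil =>
    rw [show PySem.Chars.split₀.go [] [] acc = acc.reverse from by simp [PySem.Chars.split₀.go]]
    cases acc with
    | nil => rfl
    | cons w acc' =>
      have hne : (w :: acc').reverse ≠ [] := by simp
      rw [show pvI (w :: acc') [] = ((w :: acc').reverse.map (· ++ [' '])).flatten from by simp [pvI]]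
      rw [pvFlatten_words _ hne]
      obtain ⟨a, u, hju, hans⟩ := pvJoin_ws_head _ hne haccrev
      obtain ⟨hwne, hwns⟩ := hacc w List.mem_cons_self
      obtain ⟨b, hbl, hbns⟩ := pvWord_last w hwne hwns
      unfold PySem.Chars.strip
      rw [hju, show (a :: u) ++ [' '] = a :: (u ++ [' ']) from rfl, pvLstrip_cons _ _ hans]
      rw [show a :: (u ++ [' ']) = (a :: u) ++ [' '] from rfl, ← hju, pvRstrip_append_space]
      rw [pvRstrip_id _ b (by rw [show (w :: acc').reverse = acc'.reverse ++ [w] from by simp, pvJoin_last _ _ hwne]; exact hbl) hbns]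
  | cons c cur' =>
    rw [show PySem.Chars.split₀.go [] (c :: cur') acc = acc.reverse ++ [(c :: cur').reverse] from by simp [PySem.Chars.split₀.go]]
    have hcrne : (c :: cur').reverse ≠ [] := by simp
    obtain ⟨b, hbl, hbns⟩ : ∃ b, ((c :: cur').reverse).getLast? = some b ∧ PySem.Chars.isspace b = false := by
      refine ⟨c, ?_, hcur c List.mem_cons_self⟩
      rw [List.getLast?_reverse]; rfl
    obtain ⟨hd, hhd, hhdns⟩ : ∃ hd, ((c :: cur').reverse).head? = some hd ∧ PySem.Chars.isspace hd = false := by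
      refine ⟨(c :: cur').getLast (by simp), ?_, hcur _ (List.getLast_mem _)⟩
      rw [List.head?_reverse, List.getLast?_eq_some_getLast (by simp)]
    cases acc with
    | nil =>
      rw [show pvI [] (c :: cur') = (c :: cur').reverse from by simp [pvI]]
      rw [show PySem.Chars.join [' '] ([].reverse ++ [(c :: cur').reverse]) = (c :: cur').reverse from by simp [PySem.Chars.join_singleton]]
      exact pvStrip_id _ hd b hhd hhdns hbl hbns
    | cons w acc' =>
      have hne : (w :: acc').reverse ≠ [] := by simp
      rw [pvJoin_append_single _ _ hne]
      rw [show pvI (w :: acc') (c :: cur') = ((w :: acc').reverse.map (· ++ [' '])).flatten ++ (c :: cur').reverse from rfl]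
      rw [pvFlatten_words _ hne]
      obtain ⟨a, u, hju, hans⟩ := pvJoin_ws_head _ hne haccrev
      refine pvStrip_id _ a b ?_ hans ?_ hbns
      · rw [hju]; rfl
      · rw [List.append_assoc, List.getLast?_append_of_ne_nil _ (by simp), List.getLast?_append_of_ne_nil _ (by simp [hcrne])]
        exact hbl

-- main induction: A's loop tracked against split₀'s word scanner on B's mapped characters
theorem pvMain (cs : List Char) (acc : List (List Char)) (cur : List Char) (hinv : pvInv acc cur) :
    PySem.Chars.strip (cs.foldl pvStep (pvI acc cur)) =
      PySem.Chars.join [' '] (PySem.Chars.split₀.go (cs.map pvF) cur acc) := by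
  induction cs generalizing acc cur with
  | nil => exact pvBase acc cur hinv
  | cons c cs ih =>
    obtain ⟨hcur, hacc⟩ := hinv
    simp only [List.map_cons, List.foldl_cons]
    by_cases h : PySem.Chars.isalnum c = true
    · have hsp := pvLower_nonspace c h
      have hF : pvF c = PySem.Chars.lowerChar c := by simp [pvF, h]
      rw [hF,
        show PySem.Chars.split₀.go (PySem.Chars.lowerChar c :: cs.map pvF) cur acc
           = PySem.Chars.split₀.go (cs.map pvF) (PySem.Chars.lowerChar c :: cur) acc from by
          simp [PySem.Chars.split₀.go, hsp],
        show pvStep (pvI acc cur) c = pvI acc (PySem.Chars.lowerChar c :: cur) from by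
          simp [pvStep, h, pvI]]
      refine ih acc _ ⟨?_, hacc⟩
      intro x hx
      rcases List.mem_cons.mp hx with hx | hx
      · rw [hx]; exact hsp
      · exact hcur x hx
    · have hF : pvF c = ' ' := by simp [pvF, h]
      rw [hF]
      cases cur with
      | nil =>
        rw [show PySem.Chars.split₀.go (' ' :: cs.map pvF) [] acc = PySem.Chars.split₀.go (cs.map pvF) [] acc from by
          simp [PySem.Chars.split₀.go, show PySem.Chars.isspace ' ' = true from rfl]]
        rw [show pvStep (pvI acc []) c = pvI acc [] from ?_]
        · exact ih acc [] ⟨by simp, hacc⟩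
        · unfold pvStep
          rw [if_neg (by simp [h])]
          cases acc with
          | nil => rw [if_neg (by simp [pvI])]
          | cons w acc' =>
            rw [if_neg ?_]
            rintro ⟨-, hlast⟩
            apply hlast
            rw [show pvI (w :: acc') [] = ((w :: acc').reverse.map (· ++ [' '])).flatten from by simp [pvI],
              pvFlatten_words _ (by simp)]
            simp
      | cons c' cur' =>
        rw [show PySem.Chars.split₀.go (' ' :: cs.map pvF) (c' :: cur') acc
             = PySem.Chars.split₀.go (cs.map pvF) [] ((c' :: cur').reverse :: acc) from by
          simp [PySem.Chars.split₀.go, show PySem.Chars.isspace ' ' = true from rfl]]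
        rw [show pvStep (pvI acc (c' :: cur')) c = pvI ((c' :: cur').reverse :: acc) [] from ?_]
        · refine ih _ [] ⟨by simp, ?_⟩
          intro w hw
          rcases List.mem_cons.mp hw with hw | hw
          · exact ⟨by rw [hw]; simp, by rw [hw]; intro x hx; exact hcur x (List.mem_reverse.mp hx)⟩
          · exact hacc w hw
        · unfold pvStep
          rw [if_neg (by simp [h]), if_pos ?_]
          · simp [pvI, List.append_assoc]
          · constructor
            · simp [pvI]
            · rw [show pvI acc (c' :: cur') = (acc.reverse.map (· ++ [' '])).flatten ++ (c' :: cur').reverse from rfl,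
                List.getLast?_append_of_ne_nil _ (by simp), List.getLast?_reverse]
              intro hcl
              have : PySem.Chars.isspace c' = false := hcur c' List.mem_cons_self
              rw [show (c' :: cur').head? = some c' from rfl] at hcl
              have hc' : c' = ' ' := by simpa using hcl
              rw [hc'] at this
              simp [show PySem.Chars.isspace ' ' = true from rfl] at this

-- ===== VERDICT (by name: the statement is the Claim_ definition above) =====
-- A's four single-char replaces amount to applying pvRepl4 to every character
theorem pvTextChars (value : String) :
    (PySem.Str.replace (PySem.Str.replace (PySem.Str.replace (PySem.Str.replace value "_" " ") "," " ") "{" " ") "}" " ").toList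
      = value.toList.map pvRepl4 := by
  simp only [PySem.Str.toList_replace,
    show ("_" : String).toList = ['_'] from rfl, show ("," : String).toList = [','] from rfl,
    show ("{" : String).toList = ['{'] from rfl, show ("}" : String).toList = ['}'] from rfl,
    show (" " : String).toList = [' '] from rfl, pvReplace_single, List.map_map]
  rfl

theorem normalize_instruction_query_spec : Claim_equal_normalize_instruction_query := by
  unfold Claim_equal_normalize_instruction_query
  intro value _
  unfold Spec_normalize_instruction_query normalize_instruction_query normalize_instruction_query_alt
  apply congrArg String.ofList
  rw [pvTextChars, List.foldl_map]
  rw [show (fun (toks : List Char) (ch : Char) =>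
        if PySem.Chars.isalnum (pvRepl4 ch) then toks ++ [PySem.Chars.lowerChar (pvRepl4 ch)]
        else if toks ≠ [] ∧ toks.getLast? ≠ some ' ' then toks ++ [' '] else toks)
      = fun toks ch => pvStep toks (pvRepl4 ch) from rfl]
  rw [PySem.List.foldl_congr_mem value.toList (fun toks ch => pvStep toks (pvRepl4 ch)) pvStep []
    (fun acc x _ => pvStep_repl4 acc x)]
  have := pvMain value.toList [] [] ⟨by simp, by simp⟩
  rw [show pvI [] [] = [] from rfl] at this
  rw [this]
  rfl
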